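-- pv_equiv track=rewrite | github.com/JackPlowman/tech-detective | detector/application/utils/markdown.py | find_project_technologies_and_frameworks_header
-- ===== SOURCE A (Python) =====
-- def find_project_technologies_and_frameworks_header(
--     file_contents_lines: list[str],
-- ) -> int:
--     """Find the index of the Project Technologies and Frameworks header.
--
--     Args:
--         file_contents_lines (list[str]): The lines of the file to find the header in.
--
--     Returns:
--         int: The index of the header.
--     """
--     tech_and_frameworks_header = [
--         index for index, line in enumerate(file_contents_lines) if "# Project Technologies and Frameworks" in line
--     ]
--     if not tech_and_frameworks_header:
--         return -1
--     return tech_and_frameworks_header[-1]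
-- ===== SOURCE B (Python) =====
-- def find_project_technologies_and_frameworks_header(
--     file_contents_lines: list[str],
-- ) -> int:
--     """Scan the lines from the end and return the index of the first hit."""
--     for index, line in reversed(list(enumerate(file_contents_lines))):
--         if "# Project Technologies and Frameworks" in line:
--             return index
--     return -1
-- ===== Notes on version B (the rewrite author's own statement) =====
-- stated objective: simpler
-- what changed: B scans the lines in reverse and returns the first match immediately, instead of collecting all matching indices into a list and taking its last element.
import Mathlib
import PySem

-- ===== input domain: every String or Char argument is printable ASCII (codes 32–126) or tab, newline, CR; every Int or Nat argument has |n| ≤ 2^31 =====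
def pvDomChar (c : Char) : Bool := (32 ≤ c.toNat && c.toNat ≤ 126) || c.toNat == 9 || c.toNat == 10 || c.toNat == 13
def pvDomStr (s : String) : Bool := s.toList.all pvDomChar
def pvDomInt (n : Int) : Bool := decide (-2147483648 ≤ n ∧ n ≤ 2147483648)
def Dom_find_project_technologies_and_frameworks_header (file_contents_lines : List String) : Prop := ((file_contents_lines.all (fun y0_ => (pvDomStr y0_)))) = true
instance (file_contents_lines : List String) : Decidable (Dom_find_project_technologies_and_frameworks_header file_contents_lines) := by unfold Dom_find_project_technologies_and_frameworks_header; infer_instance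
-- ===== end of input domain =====

-- B replaces A's collect-all-matching-indices-then-take-last with a reverse scan that returns the first hit (objective: simpler); not faster.
-- ===== PORT A =====
def find_project_technologies_and_frameworks_header (file_contents_lines : List String) : Int :=
  let tech_and_frameworks_header : List Int :=
    ((PySem.List.enumerate file_contents_lines 0).filter
      (fun p => PySem.Str.isIn "# Project Technologies and Frameworks" p.2)).map (fun p => p.1)
  if tech_and_frameworks_header = [] then -1
  else (PySem.List.pyGet? tech_and_frameworks_header (-1)).getD (-1)

-- ===== PORT B =====
-- B-side helper: the reverse loop, returning the first matching index or -1
def pvRevScan : List (Int × String) → Int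
  | [] => -1
  | (i, line) :: rest =>
    if PySem.Str.isIn "# Project Technologies and Frameworks" line then i else pvRevScan rest

def find_project_technologies_and_frameworks_header_alt (file_contents_lines : List String) : Int :=
  pvRevScan (PySem.List.enumerate file_contents_lines 0).reverse

-- ===== PRECONDITION & SPEC =====
def Spec_find_project_technologies_and_frameworks_header (file_contents_lines : List String) (out : Int) : Prop := out = find_project_technologies_and_frameworks_header_alt file_contents_lines
instance (file_contents_lines : List String) (out : Int) : Decidable (Spec_find_project_technologies_and_frameworks_header file_contents_lines out) := by unfold Spec_find_project_technologies_and_frameworks_header; infer_instance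

-- ===== CLAIM (what is proved, stated in full; the proofs are below) =====
def Claim_equal_find_project_technologies_and_frameworks_header : Prop := ∀ (file_contents_lines : List String), Dom_find_project_technologies_and_frameworks_header file_contents_lines → Spec_find_project_technologies_and_frameworks_header file_contents_lines (find_project_technologies_and_frameworks_header file_contents_lines)

-- ===== LEMMAS AND PROOFS =====

-- pvRevScan is find?-then-project on the reversed list
theorem pvRevScan_eq_find? (m : List (Int × String)) :
    pvRevScan m =
      ((m.find? (fun p => PySem.Str.isIn "# Project Technologies and Frameworks" p.2)).map
        (fun p => p.1)).getD (-1) := by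
  induction m with
  | nil => rfl
  | cons p rest ih =>
    obtain ⟨i, line⟩ := p
    simp only [pvRevScan, List.find?]
    cases h : PySem.Str.isIn "# Project Technologies and Frameworks" line <;> simp [ih]

-- Python xs[-1] on a nonempty list is getLast?
theorem pyGet?_neg_one {α : Type} (xs : List α) (h : xs ≠ []) :
    PySem.List.pyGet? xs (-1) = xs.getLast? := by
  have hlen : 0 < xs.length := List.length_pos_iff.mpr h
  simp only [PySem.List.pyGet?, PySem.List.pyIdx?]
  have h1 : ¬ ((0 : Int) ≤ -1) := by omega
  have h2 : (-(xs.length : Int) ≤ -1) := by omega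
  rw [if_neg h1, if_pos h2]
  simp [List.getLast?_eq_getElem?]

-- ===== VERDICT (by name: the statement is the Claim_ definition above) =====
theorem find_project_technologies_and_frameworks_header_spec : Claim_equal_find_project_technologies_and_frameworks_header := by
  intro file_contents_lines _
  unfold Spec_find_project_technologies_and_frameworks_header
  unfold find_project_technologies_and_frameworks_header
  unfold find_project_technologies_and_frameworks_header_alt
  rw [pvRevScan_eq_find?]
  set q : Int × String → Bool :=
    fun p => PySem.Str.isIn "# Project Technologies and Frameworks" p.2 with hq
  set e := PySem.List.enumerate file_contents_lines 0 with he
  simp only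
  by_cases h : (e.filter q).map (fun p => p.1) = []
  · have hf : e.filter q = [] := by
      cases hfe : e.filter q with
      | nil => rfl
      | cons a t => rw [hfe] at h; simp at h
    have : e.reverse.find? q = none := by
      rw [← List.head?_filter, List.filter_reverse, hf]
      rfl
    simp [h, this]
  · have hf : e.filter q ≠ [] := by
      intro hc; apply h; rw [hc]; rfl
    rw [if_neg h, pyGet?_neg_one _ h, List.getLast?_map,
        List.getLast?_eq_head?_reverse, ← List.filter_reverse, List.head?_filter]
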